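-- pv_equiv track=rewrite | github.com/sco1/adventofcode | 2025/Day_06/aoc_2025_day06.py | _parse_row2col
-- ===== SOURCE A (Python) =====
-- import typing as t
-- from collections import abc
--
-- COLS_T: t.TypeAlias = list[list[int]]
--
-- def _parse_row2col(raw_rows: abc.Iterable[str]) -> COLS_T:
--     rows = []
--     for r in raw_rows:
--         rows.append([int(n) for n in r.split()])
--
--     # Transpose
--     n_cols = len(rows[0])
--     cols = []
--     for i in range(n_cols):
--         cols.append([r[i] for r in rows])
--
--     return cols
-- ===== SOURCE B (Python) =====
-- import typing as t
-- from collections import abc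
--
-- COLS_T: t.TypeAlias = list[list[int]]
--
-- def _parse_row2col(raw_rows: abc.Iterable[str]) -> COLS_T:
--     rows = [[int(n) for n in r.split()] for r in raw_rows]
--     # Transpose by peeling: repeatedly take every row's head, then drop it,
--     # len(rows[0]) times -- no indexing into rows at all.
--     cols = []
--     rest = rows
--     for _ in range(len(rows[0])):
--         cols.append([r[0] for r in rest])
--         rest = [r[1:] for r in rest]
--     return cols
-- ===== Notes on version B (the rewrite author's own statement) =====
-- stated objective: alternative
-- what changed: Transpose is rebuilt as head/tail peeling: len(rows[0]) times, take every row's first element as the next column and drop it from every row, instead of A's column-major nested scan indexing r[i] for each column i.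
import Mathlib
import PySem

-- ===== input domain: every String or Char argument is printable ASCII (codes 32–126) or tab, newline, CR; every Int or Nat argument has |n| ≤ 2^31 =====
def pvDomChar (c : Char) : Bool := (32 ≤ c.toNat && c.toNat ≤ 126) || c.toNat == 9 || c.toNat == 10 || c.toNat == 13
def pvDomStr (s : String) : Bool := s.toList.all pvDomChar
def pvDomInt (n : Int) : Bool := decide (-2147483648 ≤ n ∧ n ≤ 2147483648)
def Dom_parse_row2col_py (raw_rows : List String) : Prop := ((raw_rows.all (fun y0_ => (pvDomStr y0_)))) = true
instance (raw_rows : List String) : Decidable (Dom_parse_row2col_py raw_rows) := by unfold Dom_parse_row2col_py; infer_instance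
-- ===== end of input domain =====

-- B transposes by head/tail peeling (take every row's head, drop it, n_cols times)
-- instead of A's column-major indexed scan; same return value on all of Pre_.

-- ===== PORT A =====
def parse_row2col_py (raw_rows : List String) : List (List Int) :=
  -- rows = []; for r in raw_rows: rows.append([int(n) for n in r.split()])
  let rows := raw_rows.foldl
    (fun acc r => acc ++ [(PySem.Str.split₀ r).map (fun n => (PySem.Int.ofStr? n).getD 0)]) []
  -- n_cols = len(rows[0])   (rows[0] raises on empty input: excluded by Pre_)
  let n_cols : Int := PySem.List.len (PySem.List.pyGetD rows 0 [])
  -- cols = []; for i in range(n_cols): cols.append([r[i] for r in rows])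
  let cols := (PySem.List.pyRange 0 n_cols 1).foldl
    (fun acc i => acc ++ [rows.map (fun r => PySem.List.pyGetD r i 0)]) []
  cols

-- ===== PORT B =====
-- for _ in range(len(rows[0])): cols.append([r[0] for r in rest]); rest = [r[1:] for r in rest]
def pvPeelB (k : Nat) (rest : List (List Int)) (cols : List (List Int)) : List (List Int) :=
  match k with
  | 0 => cols
  | Nat.succ k' =>
      pvPeelB k' (rest.map (fun r => PySem.List.slice r (some 1) none))
        (cols ++ [rest.map (fun r => PySem.List.pyGetD r 0 0)])

def parse_row2col_py_alt (raw_rows : List String) : List (List Int) :=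
  -- rows = [[int(n) for n in r.split()] for r in raw_rows]
  let rows := raw_rows.map (fun r => (PySem.Str.split₀ r).map (fun n => (PySem.Int.ofStr? n).getD 0))
  -- counted peeling loop, len(rows[0]) times (rows[0] raises on empty input: excluded by Pre_)
  pvPeelB (PySem.List.len (PySem.List.pyGetD rows 0 [])).toNat rows []

-- ===== PRECONDITION & SPEC =====
-- Pre_ excludes exactly the inputs where the Python A raises: the empty list (IndexError on
-- rows[0]), tokens int() rejects (ValueError), and rows with fewer tokens than the first row
-- (IndexError on r[i]); B raises on exactly the same inputs.
def Pre_parse_row2col_py (raw_rows : List String) : Prop :=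
  raw_rows ≠ [] ∧
  (∀ r ∈ raw_rows, ∀ t ∈ PySem.Str.split₀ r, (PySem.Int.ofStr? t).isSome = true) ∧
  (∀ r ∈ raw_rows, (PySem.Str.split₀ (raw_rows.headD "")).length ≤ (PySem.Str.split₀ r).length)
instance (raw_rows : List String) : Decidable (Pre_parse_row2col_py raw_rows) := by
  unfold Pre_parse_row2col_py; infer_instance

def pvWitness_parse_row2col_py : List String := ["1 2", "3 4"]

def Spec_parse_row2col_py (raw_rows : List String) (out : List (List Int)) : Prop := out = parse_row2col_py_alt raw_rows
instance (raw_rows : List String) (out : List (List Int)) : Decidable (Spec_parse_row2col_py raw_rows out) := by unfold Spec_parse_row2col_py; infer_instance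

-- ===== CLAIM (what is proved, stated in full; the proofs are below) =====
def Claim_equal_parse_row2col_py : Prop := ∀ (raw_rows : List String), Dom_parse_row2col_py raw_rows → Pre_parse_row2col_py raw_rows → Spec_parse_row2col_py raw_rows (parse_row2col_py raw_rows)

-- ===== LEMMAS AND PROOFS =====

-- B's peeling loop, started on rows with their first j elements dropped, emits
-- columns j, j+1, … of rows (out-of-range reads default to 0 on both sides).
theorem pv_peel (n : Nat) (rows cols : List (List Int)) (j : Nat) :
    pvPeelB n (rows.map (List.drop j)) cols
      = cols ++ (List.range n).map
          (fun (i : Nat) => rows.map (fun r => PySem.List.pyGetD r ((j : Int) + (i : Int)) 0)) := by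
  induction n generalizing j cols with
  | zero => simp [pvPeelB]
  | succ n ih =>
    have htail : (rows.map (List.drop j)).map (fun r => PySem.List.slice r (some 1) none)
        = rows.map (List.drop (j + 1)) := by
      simp [PySem.List.slice_from_one, List.map_map, Function.comp, List.tail_drop]
    have hhead : (rows.map (List.drop j)).map (fun r => PySem.List.pyGetD r 0 0)
        = rows.map (fun r => PySem.List.pyGetD r ((j : Int) + ((0 : Nat) : Int)) 0) := by
      rw [List.map_map]
      refine List.map_congr_left (fun r _ => ?_)
      simp [Function.comp, PySem.List.pyGetD_zero, PySem.List.pyGetD_natCast, List.getD,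
        List.getElem?_drop]
    rw [pvPeelB, htail, ih _ (j + 1)]
    rw [List.range_succ_eq_map, List.map_cons, List.map_map, List.append_assoc,
        List.singleton_append]
    congr 1
    congr 1
    · simpa using hhead
    · rw [List.map_map]
      refine List.map_congr_left (fun i _ => ?_)
      refine List.map_congr_left (fun a _ => ?_)
      congr 1
      push_cast
      ring

-- ===== VERDICT (by name: the statement is the Claim_ definition above) =====
theorem parse_row2col_py_spec : Claim_equal_parse_row2col_py := by
  intro raw_rows _ _
  unfold Spec_parse_row2col_py parse_row2col_py parse_row2col_py_alt
  simp only [PySem.List.foldl_append_singleton_eq_map, List.nil_append]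
  set rows := raw_rows.map (fun r => (PySem.Str.split₀ r).map (fun n => (PySem.Int.ofStr? n).getD 0)) with hrows
  have hd0 : (List.drop 0 : List Int → List Int) = id := funext (fun l => List.drop_zero)
  have h0 : rows = rows.map (List.drop 0) := by rw [hd0, List.map_id]
  rw [h0, pv_peel ((PySem.List.len (PySem.List.pyGetD (rows.map (List.drop 0)) 0 [])).toNat)
        rows [] 0]
  rw [PySem.List.pyRange_one, List.map_map, List.nil_append]
  refine List.map_congr_left (fun k _ => ?_)
  simp [Function.comp]
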